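-- pv_equiv track=rewrite | github.com/Gms006/Gestor_Neto_Contabilidade | Gestor_Neto_Contabilidade-main/scripts/build_processes_kpis_alerts.py | build_reinf_competencia
-- ===== SOURCE A (Python) =====
-- from collections import Counter, defaultdict
-- from typing import Any, Dict, Iterable, List, Optional
--
-- def build_reinf_competencia(deliveries: List[Dict[str, Any]]) -> Dict[str, Any]:
--     """Agrega dados de REINF por competência."""
--     by_comp = defaultdict(lambda: {"obrigatoria": 0, "dispensa": 0})
--
--     for deliv in deliveries:
--         if not deliv.get("categoria") or "reinf" not in deliv["categoria"].lower():
--             continue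
--
--         comp = deliv.get("competencia", "")
--         if not comp:
--             continue
--
--         status = (deliv.get("status") or "").lower()
--         if "obrig" in status:
--             by_comp[comp]["obrigatoria"] += 1
--         elif "dispens" in status:
--             by_comp[comp]["dispensa"] += 1
--
--     series = [{"competencia": comp, **counts} for comp, counts in sorted(by_comp.items())]
--     return {"series": series}
-- ===== SOURCE B (Python) =====
-- def build_reinf_competencia(deliveries):
--     """Agrega dados de REINF por competencia (sorted distinct comps + per-comp counting)."""
--     pairs = []
--     for deliv in deliveries:
--         cat = deliv.get("categoria")
--         if not cat or "reinf" not in cat.lower():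
--             continue
--         comp = deliv.get("competencia", "")
--         if not comp:
--             continue
--         status = (deliv.get("status") or "").lower()
--         if "obrig" in status:
--             pairs.append((comp, "obrigatoria"))
--         elif "dispens" in status:
--             pairs.append((comp, "dispensa"))
--     series = [
--         {
--             "competencia": c,
--             "obrigatoria": sum(1 for p in pairs if p == (c, "obrigatoria")),
--             "dispensa": sum(1 for p in pairs if p == (c, "dispensa")),
--         }
--         for c in sorted({c for c, _ in pairs})
--     ]
--     return {"series": series}
-- ===== Notes on version B (the rewrite author's own statement) =====
-- stated objective: alternative
-- what changed: Replaces the defaultdict hash-aggregate-then-sort-items with collecting (competencia, bucket) pairs, sorting the distinct competencias once, and counting each bucket per competencia by a scan over the pairs.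
import Mathlib
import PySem

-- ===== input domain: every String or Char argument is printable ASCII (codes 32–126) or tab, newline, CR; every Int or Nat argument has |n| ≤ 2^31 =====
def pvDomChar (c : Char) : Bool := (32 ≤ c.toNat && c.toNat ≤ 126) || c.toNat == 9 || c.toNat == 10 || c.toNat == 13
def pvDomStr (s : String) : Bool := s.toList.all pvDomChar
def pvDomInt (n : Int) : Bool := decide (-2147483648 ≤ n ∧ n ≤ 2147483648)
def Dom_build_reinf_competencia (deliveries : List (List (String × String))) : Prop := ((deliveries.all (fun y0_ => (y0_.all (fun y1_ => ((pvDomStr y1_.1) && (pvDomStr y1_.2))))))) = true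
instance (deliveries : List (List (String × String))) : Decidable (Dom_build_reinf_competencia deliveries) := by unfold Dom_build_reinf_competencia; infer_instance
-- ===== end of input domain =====

-- B replaces A's defaultdict aggregation (hash-aggregate the counts, then sort the items) by
-- collecting the (competencia, bucket) pairs, sorting the distinct competencias once, and
-- counting each bucket per competencia with a scan over the pairs (objective: alternative).

-- shared dict primitive: first-match lookup on the association list (Python dict .get)
def pvGet (d : List (String × String)) (k : String) : Option String :=
  (d.find? (fun p => p.1 == k)).map (fun p => p.2)

def pvGetD (d : List (String × String)) (k dflt : String) : String :=
  (pvGet d k).getD dflt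

-- ===== PORT A =====
-- by_comp[comp]["obrigatoria"] += 1 on the insertion-ordered dict: bump in place, append if new
def pvBumpOb : List (String × Int × Int) → String → List (String × Int × Int)
  | [], c => [(c, 1, 0)]
  | (k, o, dp) :: t, c => if k == c then (k, o + 1, dp) :: t else (k, o, dp) :: pvBumpOb t c

def pvBumpDi : List (String × Int × Int) → String → List (String × Int × Int)
  | [], c => [(c, 0, 1)]
  | (k, o, dp) :: t, c => if k == c then (k, o, dp + 1) :: t else (k, o, dp) :: pvBumpDi t c

-- the body of A's 'for deliv in deliveries' loop
def pvStepA (bc : List (String × Int × Int)) (deliv : List (String × String)) : List (String × Int × Int) :=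
  match pvGet deliv "categoria" with
  | none => bc
  | some cat =>
    if cat == "" then bc
    else if !PySem.Str.isIn "reinf" (PySem.Str.lower cat) then bc
    else
      let comp := pvGetD deliv "competencia" ""
      if comp == "" then bc
      else
        let status := PySem.Str.lower (pvGetD deliv "status" "")
        if PySem.Str.isIn "obrig" status then pvBumpOb bc comp
        else if PySem.Str.isIn "dispens" status then pvBumpDi bc comp
        else bc

-- sorted(by_comp.items()) compares the comp keys first; they are distinct, so the key sort is exact
def build_reinf_competencia (deliveries : List (List (String × String))) : List (String × List (List (String × String))) :=
  let by_comp := deliveries.foldl pvStepA []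
  let series := (PySem.List.sorted by_comp (fun p => p.1) false).map
    (fun p => [("competencia", p.1),
               ("obrigatoria", PySem.Int.toStr p.2.1),
               ("dispensa", PySem.Int.toStr p.2.2)])
  [("series", series)]

-- ===== PORT B =====
-- the body of B's pair-collecting loop (pairs.append((comp, bucket)))
def pvStepB (acc : List (String × String)) (deliv : List (String × String)) : List (String × String) :=
  match pvGet deliv "categoria" with
  | none => acc
  | some cat =>
    if cat == "" then acc
    else if !PySem.Str.isIn "reinf" (PySem.Str.lower cat) then acc
    else
      let comp := pvGetD deliv "competencia" ""
      if comp == "" then acc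
      else
        let status := PySem.Str.lower (pvGetD deliv "status" "")
        if PySem.Str.isIn "obrig" status then acc ++ [(comp, "obrigatoria")]
        else if PySem.Str.isIn "dispens" status then acc ++ [(comp, "dispensa")]
        else acc

-- sorted({c for c, _ in pairs}) = PySem.List.sorted (PySem.Set.ofList …) id (key injective on a set);
-- sum(1 for p in pairs if p == x) is the 0/1-sum = PySem.List.count pairs x
def build_reinf_competencia_alt (deliveries : List (List (String × String))) : List (String × List (List (String × String))) :=
  let pairs := deliveries.foldl pvStepB []
  let comps := PySem.List.sorted (PySem.Set.ofList (pairs.map (fun p => p.1))) (fun c => c) false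
  let series := comps.map (fun c =>
    [("competencia", c),
     ("obrigatoria", PySem.Int.toStr (PySem.List.count pairs (c, "obrigatoria") : Int)),
     ("dispensa", PySem.Int.toStr (PySem.List.count pairs (c, "dispensa") : Int))])
  [("series", series)]

-- ===== PRECONDITION & SPEC =====
-- A is total: no Pre_.
def Spec_build_reinf_competencia (deliveries : List (List (String × String))) (out : List (String × List (List (String × String)))) : Prop := out = build_reinf_competencia_alt deliveries
instance (deliveries : List (List (String × String))) (out : List (String × List (List (String × String)))) : Decidable (Spec_build_reinf_competencia deliveries out) := by unfold Spec_build_reinf_competencia; infer_instance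

-- ===== CLAIM =====
def Claim_equal_build_reinf_competencia : Prop := ∀ (deliveries : List (List (String × String))), Dom_build_reinf_competencia deliveries → Spec_build_reinf_competencia deliveries (build_reinf_competencia deliveries)

-- ===== LEMMAS AND PROOFS =====

-- the common filter of both loops, factored for the proofs: the (comp, bucket) pair a record yields
def pvPair (deliv : List (String × String)) : Option (String × String) :=
  match pvGet deliv "categoria" with
  | none => none
  | some cat =>
    if cat == "" then none
    else if !PySem.Str.isIn "reinf" (PySem.Str.lower cat) then none
    else
      let comp := pvGetD deliv "competencia" ""
      if comp == "" then none
      else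
        let status := PySem.Str.lower (pvGetD deliv "status" "")
        if PySem.Str.isIn "obrig" status then some (comp, "obrigatoria")
        else if PySem.Str.isIn "dispens" status then some (comp, "dispensa")
        else none

theorem pvStepB_eq (acc : List (String × String)) (d : List (String × String)) :
    pvStepB acc d = acc ++ (pvPair d).toList := by
  unfold pvStepB pvPair
  cases pvGet d "categoria" with
  | none => simp
  | some cat => dsimp only; split_ifs <;> simp

theorem pvStepA_eq (bc : List (String × Int × Int)) (d : List (String × String)) :
    pvStepA bc d =
      match pvPair d with
      | none => bc
      | some (c, b) => if b = "obrigatoria" then pvBumpOb bc c else pvBumpDi bc c := by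
  unfold pvStepA pvPair
  cases pvGet d "categoria" with
  | none => rfl
  | some cat => dsimp only; split_ifs <;> simp

-- bucket strings produced by pvPair
theorem pvPair_bucket (d : List (String × String)) (c b : String) (h : pvPair d = some (c, b)) :
    b = "obrigatoria" ∨ b = "dispensa" := by
  unfold pvPair at h
  cases hg : pvGet d "categoria" with
  | none => rw [hg] at h; simp at h
  | some cat =>
    rw [hg] at h
    simp only at h
    split_ifs at h <;> simp_all

-- counts as Ints, written exactly as B's port computes them
def pvCntO (ps : List (String × String)) (c : String) : Int :=
  (PySem.List.count ps (c, "obrigatoria") : Int)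
def pvCntD (ps : List (String × String)) (c : String) : Int :=
  (PySem.List.count ps (c, "dispensa") : Int)

-- canonical form of A's by_comp dict after processing the pairs ps
def pvRepr (ps : List (String × String)) : List (String × Int × Int) :=
  (PySem.List.dedup (ps.map (fun p => p.1))).map (fun c => (c, pvCntO ps c, pvCntD ps c))

theorem dedup_append_singleton {α : Type} [BEq α] [LawfulBEq α] (xs : List α) (x : α) :
    PySem.List.dedup (xs ++ [x]) =
      if x ∈ xs then PySem.List.dedup xs else PySem.List.dedup xs ++ [x] := by
  have h : PySem.List.dedup (xs ++ [x]) = PySem.Set.add (PySem.List.dedup xs) x := by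
    simp [PySem.Set.ofList_eq_foldl, List.foldl_append]
  rw [h]
  by_cases hx : x ∈ xs <;>
    simp [PySem.Set.add, PySem.Set.contains, hx]

-- bump on a mapped key list: in place if the key is present (keys nodup), appended if not
theorem bumpOb_map_mem (ks : List String) (o d : String → Int) (c : String)
    (hnd : ks.Nodup) (hc : c ∈ ks) :
    pvBumpOb (ks.map (fun k => (k, o k, d k))) c
      = ks.map (fun k => (k, o k + (if k = c then 1 else 0), d k)) := by
  induction ks with
  | nil => simp at hc
  | cons k t ih =>
    rcases List.nodup_cons.mp hnd with ⟨hk, hnd'⟩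
    by_cases hkc : k = c
    · subst hkc
      simp only [List.map_cons, pvBumpOb, beq_self_eq_true, if_pos]
      refine congrArg (_ :: ·) ?_
      refine (List.map_congr_left fun y hy => ?_)
      have hy' : ¬ y = k := fun h => hk (h ▸ hy)
      simp [hy']
    · have hct : c ∈ t := by rcases List.mem_cons.mp hc with h | h; exact absurd h.symm hkc; exact h
      simp only [List.map_cons, pvBumpOb]
      rw [if_neg (by simp [hkc])]
      simp [ih hnd' hct, hkc]

theorem bumpOb_map_notmem (ks : List String) (o d : String → Int) (c : String) (hc : c ∉ ks) :
    pvBumpOb (ks.map (fun k => (k, o k, d k))) c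
      = ks.map (fun k => (k, o k, d k)) ++ [(c, 1, 0)] := by
  induction ks with
  | nil => rfl
  | cons k t ih =>
    have hkc : ¬ k = c := fun h => hc (h ▸ List.mem_cons_self ..)
    simp only [List.map_cons, pvBumpOb]
    rw [if_neg (by simp [hkc])]
    simp [ih (fun h => hc (List.mem_cons_of_mem _ h))]

theorem bumpDi_map_mem (ks : List String) (o d : String → Int) (c : String)
    (hnd : ks.Nodup) (hc : c ∈ ks) :
    pvBumpDi (ks.map (fun k => (k, o k, d k))) c
      = ks.map (fun k => (k, o k, d k + (if k = c then 1 else 0))) := by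
  induction ks with
  | nil => simp at hc
  | cons k t ih =>
    rcases List.nodup_cons.mp hnd with ⟨hk, hnd'⟩
    by_cases hkc : k = c
    · subst hkc
      simp only [List.map_cons, pvBumpDi, beq_self_eq_true, if_pos]
      refine congrArg (_ :: ·) ?_
      refine (List.map_congr_left fun y hy => ?_)
      have hy' : ¬ y = k := fun h => hk (h ▸ hy)
      simp [hy']
    · have hct : c ∈ t := by rcases List.mem_cons.mp hc with h | h; exact absurd h.symm hkc; exact h
      simp only [List.map_cons, pvBumpDi]
      rw [if_neg (by simp [hkc])]
      simp [ih hnd' hct, hkc]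

theorem bumpDi_map_notmem (ks : List String) (o d : String → Int) (c : String) (hc : c ∉ ks) :
    pvBumpDi (ks.map (fun k => (k, o k, d k))) c
      = ks.map (fun k => (k, o k, d k)) ++ [(c, 0, 1)] := by
  induction ks with
  | nil => rfl
  | cons k t ih =>
    have hkc : ¬ k = c := fun h => hc (h ▸ List.mem_cons_self ..)
    simp only [List.map_cons, pvBumpDi]
    rw [if_neg (by simp [hkc])]
    simp [ih (fun h => hc (List.mem_cons_of_mem _ h))]

theorem count_pair_singleton (k c b b' : String) :
    List.count (k, b) [(c, b')] = if k = c ∧ b = b' then 1 else 0 := by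
  by_cases h1 : k = c <;> by_cases h2 : b = b' <;>
    simp [Prod.ext_iff, h1, h2, eq_comm]

theorem pvRepr_append_ob (ps : List (String × String)) (c : String) :
    pvRepr (ps ++ [(c, "obrigatoria")]) = pvBumpOb (pvRepr ps) c := by
  unfold pvRepr
  rw [List.map_append, List.map_singleton, dedup_append_singleton]
  by_cases hc : c ∈ ps.map (fun p => p.1)
  · rw [if_pos hc,
      bumpOb_map_mem _ _ _ _ (PySem.List.nodup_dedup _) ((PySem.List.mem_dedup ..).mpr hc)]
    refine List.map_congr_left fun k hk => ?_
    by_cases hkc : k = c <;>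
      simp [pvCntO, pvCntD, PySem.List.count_eq, List.count_append, count_pair_singleton, hkc]
  · rw [if_neg hc, List.map_append, List.map_singleton,
      bumpOb_map_notmem _ _ _ _ (fun h => hc ((PySem.List.mem_dedup ..).mp h))]
    refine congrArg₂ (· ++ ·) ?_ ?_
    · refine List.map_congr_left fun k hk => ?_
      have hkc : ¬ k = c := fun h => hc (h ▸ (PySem.List.mem_dedup ..).mp hk)
      simp [pvCntO, pvCntD, PySem.List.count_eq, List.count_append, count_pair_singleton, hkc]
    · have h0 : ∀ b, List.count (c, b) ps = 0 := by
        intro b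
        refine List.count_eq_zero.mpr fun h => hc ?_
        exact List.mem_map.mpr ⟨(c, b), h, rfl⟩
      simp [pvCntO, pvCntD, PySem.List.count_eq, List.count_append, h0]

theorem pvRepr_append_di (ps : List (String × String)) (c : String) :
    pvRepr (ps ++ [(c, "dispensa")]) = pvBumpDi (pvRepr ps) c := by
  unfold pvRepr
  rw [List.map_append, List.map_singleton, dedup_append_singleton]
  by_cases hc : c ∈ ps.map (fun p => p.1)
  · rw [if_pos hc,
      bumpDi_map_mem _ _ _ _ (PySem.List.nodup_dedup _) ((PySem.List.mem_dedup ..).mpr hc)]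
    refine List.map_congr_left fun k hk => ?_
    by_cases hkc : k = c <;>
      simp [pvCntO, pvCntD, PySem.List.count_eq, List.count_append, count_pair_singleton, hkc]
  · rw [if_neg hc, List.map_append, List.map_singleton,
      bumpDi_map_notmem _ _ _ _ (fun h => hc ((PySem.List.mem_dedup ..).mp h))]
    refine congrArg₂ (· ++ ·) ?_ ?_
    · refine List.map_congr_left fun k hk => ?_
      have hkc : ¬ k = c := fun h => hc (h ▸ (PySem.List.mem_dedup ..).mp hk)
      simp [pvCntO, pvCntD, PySem.List.count_eq, List.count_append, count_pair_singleton, hkc]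
    · have h0 : ∀ b, List.count (c, b) ps = 0 := by
        intro b
        refine List.count_eq_zero.mpr fun h => hc ?_
        exact List.mem_map.mpr ⟨(c, b), h, rfl⟩
      simp [pvCntO, pvCntD, PySem.List.count_eq, List.count_append, h0]

theorem pvStepA_repr (ps : List (String × String)) (d : List (String × String)) :
    pvStepA (pvRepr ps) d = pvRepr (pvStepB ps d) := by
  rw [pvStepA_eq, pvStepB_eq]
  cases hp : pvPair d with
  | none => simp
  | some p =>
    obtain ⟨c, b⟩ := p
    rcases pvPair_bucket d c b hp with hb | hb <;> subst hb <;>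
      simp [pvRepr_append_ob, pvRepr_append_di]

theorem foldl_repr (ds : List (List (String × String))) (ps : List (String × String)) :
    ds.foldl pvStepA (pvRepr ps) = pvRepr (ds.foldl pvStepB ps) := by
  induction ds generalizing ps with
  | nil => rfl
  | cons d t ih => simp only [List.foldl_cons, pvStepA_repr]; exact ih _

-- ===== VERDICT =====
theorem build_reinf_competencia_spec : Claim_equal_build_reinf_competencia := by
  intro ds _
  unfold Spec_build_reinf_competencia
  have hfold : ds.foldl pvStepA ([] : List (String × Int × Int))
      = pvRepr (ds.foldl pvStepB []) := foldl_repr ds []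
  have hsort : PySem.List.sorted (pvRepr (ds.foldl pvStepB [])) (fun p => p.1) false
      = (PySem.List.sorted (PySem.Set.ofList ((ds.foldl pvStepB []).map (fun p => p.1)))
          (fun c => c) false).map
          (fun c => (c, pvCntO (ds.foldl pvStepB []) c, pvCntD (ds.foldl pvStepB []) c)) := by
    apply PySem.List.sorted_eq_of_perm_of_pairwise_lt
    · refine ((PySem.List.sorted_perm _ _ _).map _).trans ?_
      unfold pvRepr
      simp
    · exact List.Pairwise.map _ (fun a b h => h)
        (PySem.List.sorted_ofList_pairwise_lt ((ds.foldl pvStepB []).map (fun p => p.1)))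
  simp only [build_reinf_competencia, build_reinf_competencia_alt]
  rw [hfold, hsort, List.map_map]
  rfl
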